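-- pv_equiv track=rewrite | github.com/Sushan2428/Python-Project | week 7/1.py | unique_letters_sorted
-- ===== SOURCE A (Python) =====
-- def unique_letters_sorted(input_string):
--     input_string = input_string.lower()
--     unique_letters = set()
--     for char in input_string:
--         if char.isalpha():
--             unique_letters.add(char)
--     sort_letters = sorted(list(unique_letters))
--     return sort_letters
-- ===== SOURCE B (Python) =====
-- def unique_letters_sorted(input_string):
--     letters = sorted([c for c in input_string.lower() if c.isalpha()])
--     out = []
--     for ch in letters:
--         if not out or ch != out[-1]:
--             out.append(ch)
--     return out
-- ===== Notes on version B (the rewrite author's own statement) =====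
-- stated objective: alternative
-- what changed: B sorts the filtered letters with duplicates still present and deduplicates in a separate post-sort pass by comparing each letter to the last emitted one, instead of hashing into a set before sorting.
import Mathlib
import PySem

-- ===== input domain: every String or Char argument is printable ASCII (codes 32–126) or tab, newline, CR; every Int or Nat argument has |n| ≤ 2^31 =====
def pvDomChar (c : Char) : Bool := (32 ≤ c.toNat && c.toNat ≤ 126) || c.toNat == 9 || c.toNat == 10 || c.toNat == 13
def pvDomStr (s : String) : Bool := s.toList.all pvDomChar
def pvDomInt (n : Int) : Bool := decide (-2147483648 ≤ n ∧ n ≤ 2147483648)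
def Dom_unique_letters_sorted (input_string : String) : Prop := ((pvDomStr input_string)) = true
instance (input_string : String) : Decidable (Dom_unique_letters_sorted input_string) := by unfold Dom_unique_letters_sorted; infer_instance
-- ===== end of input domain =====

-- B replaces A's hash-set-then-sort with sort-then-adjacent-dedup: a genuinely different dedup strategy of the same cost (objective: alternative).

-- ===== PORT A =====
-- A: lowercase; one loop adding alphabetic chars to a set; sorted(list(set)).
def unique_letters_sorted (input_string : String) : List String :=
  let ls := PySem.Chars.lower input_string.toList
  let uniq : PySem.Set Char :=
    ls.foldl (fun acc c => if PySem.Chars.isalpha c then PySem.Set.add acc c else acc) PySem.Set.empty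
  (PySem.List.sorted uniq (fun c => c) false).map (fun c => String.ofList [c])

-- ===== PORT B =====
-- B: sort the filtered letters (duplicates kept), then one pass appending a char only when it differs from the last emitted one.
def unique_letters_sorted_alt (input_string : String) : List String :=
  let letters := PySem.List.sorted ((PySem.Chars.lower input_string.toList).filter PySem.Chars.isalpha) (fun c => c) false
  let out := letters.foldl
    (fun (acc : List Char) ch => if acc.isEmpty || acc.getLast? != some ch then acc ++ [ch] else acc) []
  out.map (fun c => String.ofList [c])

-- ===== PRECONDITION & SPEC =====
def Spec_unique_letters_sorted (input_string : String) (out : List String) : Prop := out = unique_letters_sorted_alt input_string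
instance (input_string : String) (out : List String) : Decidable (Spec_unique_letters_sorted input_string out) := by unfold Spec_unique_letters_sorted; infer_instance

-- ===== CLAIM (what is proved, stated in full; the proofs are below) =====
def Claim_equal_unique_letters_sorted : Prop := ∀ (input_string : String), Dom_unique_letters_sorted input_string → Spec_unique_letters_sorted input_string (unique_letters_sorted input_string)

-- ===== LEMMAS AND PROOFS =====

-- in a strictly increasing list every member is at most the last element
theorem mem_le_getLast_of_pairwise_lt (l : List Char) (h : l.Pairwise (· < ·)) (hne : l ≠ []) (x : Char) (hx : x ∈ l) : x ≤ l.getLast hne := by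
  induction l with
  | nil => simp at hx
  | cons a t ih =>
    rcases List.mem_cons.mp hx with rfl | hxt
    · cases t with
      | nil => simp [List.getLast]
      | cons b u =>
        have h1 : x < (b::u).getLast (by simp) := (List.pairwise_cons.mp h).1 _ (List.getLast_mem _)
        simpa [List.getLast_cons] using le_of_lt h1
    · have hne' : t ≠ [] := by rintro rfl; simp at hxt
      have := ih (List.pairwise_cons.mp h).2 hne' hxt
      simpa [List.getLast_cons hne'] using this

-- A's filtering set-build loop is Set.ofList of the filtered list.
theorem foldl_add_if_eq_ofList_filter (p : Char → Bool) :
    ∀ (ls : List Char) (s : PySem.Set Char),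
      ls.foldl (fun acc c => if p c then PySem.Set.add acc c else acc) s
        = (ls.filter p).foldl PySem.Set.add s := by
  intro ls
  induction ls with
  | nil => intro s; rfl
  | cons c t ih =>
    intro s
    by_cases h : p c = true <;> simp [List.foldl, List.filter, h, ih]

-- B's dedup loop: given a (≤)-sorted input and a (<)-sorted accumulator dominated by the input,
-- the result is (<)-sorted and its members are exactly acc's plus the input's.
theorem dedup_loop_spec :
    ∀ (cs acc : List Char), cs.Pairwise (· ≤ ·) → acc.Pairwise (· < ·) →
      (∀ x ∈ acc, ∀ c ∈ cs, x ≤ c) →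
      (cs.foldl (fun (acc : List Char) ch => if acc.isEmpty || acc.getLast? != some ch then acc ++ [ch] else acc) acc).Pairwise (· < ·)
      ∧ ∀ x, x ∈ cs.foldl (fun (acc : List Char) ch => if acc.isEmpty || acc.getLast? != some ch then acc ++ [ch] else acc) acc
          ↔ x ∈ acc ∨ x ∈ cs := by
  intro cs
  induction cs with
  | nil => intro acc _ hacc _; exact ⟨hacc, fun x => by simp⟩
  | cons c t ih =>
    intro acc hcs hacc hdom
    have hcs' : t.Pairwise (· ≤ ·) := hcs.tail
    have hct : ∀ x ∈ t, c ≤ x := fun x hx => (List.pairwise_cons.mp hcs).1 x hx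
    rw [List.foldl_cons]
    by_cases hcond : (acc.isEmpty || acc.getLast? != some c) = true
    · -- append c
      rw [if_pos hcond]
      have hlast : ∀ x ∈ acc, x < c := by
        intro x hx
        have hle : x ≤ c := hdom x hx c (List.mem_cons_self)
        rcases lt_or_eq_of_le hle with h | h
        · exact h
        · exfalso
          subst h
          have hne : acc ≠ [] := by rintro rfl; simp at hx
          have h1 : acc.getLast hne ≤ x := hdom _ (List.getLast_mem hne) x (List.mem_cons_self)
          have h2 : x ≤ acc.getLast hne := mem_le_getLast_of_pairwise_lt acc hacc hne x hx
          have heq : acc.getLast? = some x := by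
            rw [List.getLast?_eq_getLast (l := acc) hne]
            exact congrArg some (le_antisymm h1 h2)
          simp [hne, heq] at hcond
      have hacc' : (acc ++ [c]).Pairwise (· < ·) := by
        refine List.pairwise_append.mpr ⟨hacc, by simp, ?_⟩
        intro x hx y hy; simp at hy; subst hy; exact hlast x hx
      have hdom' : ∀ x ∈ acc ++ [c], ∀ d ∈ t, x ≤ d := by
        intro x hx d hd
        rcases List.mem_append.mp hx with h | h
        · exact hdom x h d (List.mem_cons_of_mem _ hd)
        · simp at h; subst h; exact hct d hd
      obtain ⟨hp, hm⟩ := ih (acc ++ [c]) hcs' hacc' hdom'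
      refine ⟨hp, fun x => ?_⟩
      rw [hm x]
      simp only [List.mem_append, List.mem_cons]
      tauto
    · -- skip: the last element of acc is c, so c ∈ acc
      rw [if_neg hcond]
      have hcmem : c ∈ acc := by
        simp only [Bool.or_eq_true, List.isEmpty_iff, bne_iff_ne, ne_eq, not_or, not_not] at hcond
        exact List.mem_of_getLast? hcond.2
      have hdom' : ∀ x ∈ acc, ∀ d ∈ t, x ≤ d := fun x hx d hd => hdom x hx d (List.mem_cons_of_mem _ hd)
      obtain ⟨hp, hm⟩ := ih acc hcs' hacc hdom'
      refine ⟨hp, fun x => ?_⟩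
      rw [hm x]
      simp only [List.mem_cons]
      constructor
      · tauto
      · rintro (h | h | h)
        · exact Or.inl h
        · subst h; exact Or.inl hcmem
        · exact Or.inr h

-- the two char-level results agree: sorted(set(f)) = adjacency-dedup(sorted(f))
theorem chars_agree (f : List Char) :
    PySem.List.sorted (PySem.Set.ofList f) (fun c => c) false
      = (PySem.List.sorted f (fun c => c) false).foldl
          (fun (acc : List Char) ch => if acc.isEmpty || acc.getLast? != some ch then acc ++ [ch] else acc) [] := by
  have hsort : (PySem.List.sorted f (fun c => c) false).Pairwise (· ≤ ·) := by
    simpa using PySem.List.sorted_pairwise (xs := f) (key := fun c => c)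
  obtain ⟨hp, hm⟩ := dedup_loop_spec (PySem.List.sorted f (fun c => c) false) [] hsort (by simp) (by simp)
  have hperm : List.Perm ((PySem.List.sorted f (fun c => c) false).foldl
      (fun (acc : List Char) ch => if acc.isEmpty || acc.getLast? != some ch then acc ++ [ch] else acc) [])
      (PySem.Set.ofList f) := by
    refine (List.perm_ext_iff_of_nodup ?_ ?_).mpr ?_
    · exact hp.imp ne_of_lt
    · exact PySem.Set.nodup_ofList f
    · intro a
      rw [hm a]
      simp [PySem.Set.mem_ofList, PySem.List.mem_sorted]
  exact PySem.List.sorted_eq_of_perm_of_pairwise_lt _ _ _ hperm hp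

-- ===== VERDICT (by name: the statement is the Claim_ definition above) =====
theorem unique_letters_sorted_spec : Claim_equal_unique_letters_sorted := by
  intro input_string _
  unfold Spec_unique_letters_sorted unique_letters_sorted unique_letters_sorted_alt
  dsimp only
  rw [foldl_add_if_eq_ofList_filter]
  rw [show ((PySem.Chars.lower input_string.toList).filter PySem.Chars.isalpha).foldl PySem.Set.add PySem.Set.empty
        = PySem.Set.ofList ((PySem.Chars.lower input_string.toList).filter PySem.Chars.isalpha) from rfl]
  rw [chars_agree]
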